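-- pv_equiv track=rewrite | github.com/SimuladorDeFarm/Trabajo-grafos-2024 | functions/cantidad_convinaciones.py | cantidad_convinaciones
-- ===== SOURCE A (Python) =====
-- def cantidad_convinaciones(rutas, convinaciones):
--
--     n_filas = len(rutas)
--     n_columnas = len(rutas[0])
--
--     #numero de filas de las convinaciones
--     n_filas_c = len(convinaciones)
--
--     #contar cantidad de convinaciones
--     contador = [0] * n_filas
--
--     i = 0
--     j = 0
--     x = 0
--
--     while i < n_filas:
--         n_columnas = len(rutas[i])
--         j = 0
--         while j < n_columnas:
--             x = 0
--
--
--             while x < n_filas_c: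
--
--                 if convinaciones[x] == rutas[i][j] :
--
--                     #cuenta la catidad de convinaciones
--                     contador[i]+=1
--                 x+=1
--             j+=1
--         i+=1
--     #ordena el arreglo de menor  a mayor
--     contador.sort()
--
--     return contador[0]
-- ===== SOURCE B (Python) =====
-- def cantidad_convinaciones(rutas, convinaciones):
--     # frequency table of the combinations, built once
--     conv = {}
--     for v in convinaciones:
--         conv[v] = conv.get(v, 0) + 1
--     totals = []
--     for fila in rutas:
--         # per-row frequency table; dot product over the row's distinct values
--         fila_c = {}
--         for celda in fila:
--             fila_c[celda] = fila_c.get(celda, 0) + 1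
--         totals.append(sum(c * conv.get(v, 0) for v, c in fila_c.items()))
--     return min(totals)
-- ===== Notes on version B (the rewrite author's own statement) =====
-- stated objective: faster
-- what changed: Replaces the triple nested index loop (rescanning the whole combination list for every cell) by frequency tables: one Counter-style dict of the combinations built once, a per-row dict of cell counts, and a dot product over the row's distinct values; the minimum is taken directly instead of sorting and indexing.
import Mathlib
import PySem

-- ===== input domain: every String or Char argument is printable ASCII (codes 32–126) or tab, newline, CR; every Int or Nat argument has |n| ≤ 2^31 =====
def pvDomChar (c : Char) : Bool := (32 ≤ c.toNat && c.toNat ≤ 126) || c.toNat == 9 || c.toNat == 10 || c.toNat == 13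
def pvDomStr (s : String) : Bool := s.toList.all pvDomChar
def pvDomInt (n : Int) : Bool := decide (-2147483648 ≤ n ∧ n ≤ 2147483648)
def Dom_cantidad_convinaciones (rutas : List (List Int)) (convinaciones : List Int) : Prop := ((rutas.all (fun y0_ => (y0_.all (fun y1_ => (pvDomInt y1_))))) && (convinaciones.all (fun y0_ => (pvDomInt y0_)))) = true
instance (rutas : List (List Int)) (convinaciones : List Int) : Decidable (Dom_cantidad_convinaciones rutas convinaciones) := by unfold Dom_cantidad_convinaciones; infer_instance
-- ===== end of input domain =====

-- B replaces A's triple nested scan by frequency tables (combination counts built once,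
-- per-row counts, dot product over distinct values) and takes the minimum directly.

-- ===== PORT A =====
-- A: for each row, for each cell, scan the whole combination list counting matches;
-- then sort the per-row totals and return the first element.
def cantidad_convinaciones (rutas : List (List Int)) (convinaciones : List Int) : Int :=
  let contador := rutas.map (fun fila =>
    fila.foldl (fun acc celda =>
      convinaciones.foldl (fun a v => if v == celda then a + 1 else a) acc) (0 : Int))
  match PySem.List.pyGet? (PySem.List.sorted contador (fun x => x) false) 0 with
  | some m => m
  | none => 0   -- unreachable under Pre_ (rutas ≠ []): Python raises IndexError here

-- ===== PORT B =====
def cantidad_convinaciones_alt (rutas : List (List Int)) (convinaciones : List Int) : Int :=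
  let conv := convinaciones.foldl (fun d v => d.insert v (d.getD v 0 + 1))
    (PySem.Dict.empty : PySem.Dict Int Int)
  let totals := rutas.map (fun fila =>
    let fila_c := fila.foldl (fun d celda => d.insert celda (d.getD celda 0 + 1))
      (PySem.Dict.empty : PySem.Dict Int Int)
    (fila_c.items.map (fun p => p.2 * conv.getD p.1 0)).sum)
  match PySem.List.min? totals (fun x => x) with
  | some m => m
  | none => 0   -- unreachable under Pre_ (rutas ≠ []): Python's min([]) raises ValueError

-- ===== PRECONDITION & SPEC =====
-- Pre_ excludes only rutas = [], on which A raises IndexError (rutas[0]) and B raises ValueError (min([])).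
def Pre_cantidad_convinaciones (rutas : List (List Int)) (_convinaciones : List Int) : Prop :=
  rutas ≠ []
instance (rutas : List (List Int)) (convinaciones : List Int) : Decidable (Pre_cantidad_convinaciones rutas convinaciones) := by unfold Pre_cantidad_convinaciones; infer_instance
def pvWitness_cantidad_convinaciones : List (List Int) × List Int := ([[1, 2], [3]], [2, 2, 3])

def Spec_cantidad_convinaciones (rutas : List (List Int)) (convinaciones : List Int) (out : Int) : Prop := out = cantidad_convinaciones_alt rutas convinaciones
instance (rutas : List (List Int)) (convinaciones : List Int) (out : Int) : Decidable (Spec_cantidad_convinaciones rutas convinaciones out) := by unfold Spec_cantidad_convinaciones; infer_instance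

-- ===== CLAIM (what is proved, stated in full; the proofs are below) =====
def Claim_equal_cantidad_convinaciones : Prop := ∀ (rutas : List (List Int)) (convinaciones : List Int), Dom_cantidad_convinaciones rutas convinaciones → Pre_cantidad_convinaciones rutas convinaciones → Spec_cantidad_convinaciones rutas convinaciones (cantidad_convinaciones rutas convinaciones)

-- ===== LEMMAS AND PROOFS =====

-- A's innermost scan adds the number of matches of `celda` in `convs`.
theorem inner_scan_eq_count (convs : List Int) (celda : Int) :
    ∀ acc : Int, convs.foldl (fun a v => if v == celda then a + 1 else a) acc
      = acc + (convs.count celda : Int) := by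
  induction convs with
  | nil => intro acc; simp
  | cons v t ih =>
      intro acc
      simp only [List.foldl_cons, ih, List.count_cons]
      by_cases h : v = celda
      · simp only [h, beq_self_eq_true, if_true]
        push_cast
        ring
      · simp [h]

-- A's per-row double loop computes the sum over the row's cells of their match counts.
theorem rowA_eq_sum (convs : List Int) :
    ∀ (fila : List Int) (a : Int),
      fila.foldl (fun acc celda =>
          convs.foldl (fun x v => if v == celda then x + 1 else x) acc) a
        = a + (fila.map (fun c => (convs.count c : Int))).sum := by
  intro fila
  induction fila with
  | nil => intro a; simp
  | cons c t ih =>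
      intro a
      rw [List.foldl_cons, ih, inner_scan_eq_count, List.map_cons, List.sum_cons]
      ring

-- Picking g at one key from a duplicate-free list.
theorem sum_map_ite_single (g : Int → Int) (c : Int) :
    ∀ s : List Int, s.Nodup → c ∈ s →
      (s.map (fun k => if k = c then g k else 0)).sum = g c := by
  intro s
  induction s with
  | nil => intro _ h; simp at h
  | cons x t ih =>
      intro hnd hm
      simp only [List.map_cons, List.sum_cons]
      rcases List.mem_cons.mp hm with rfl | h
      · have hx : c ∉ t := (List.nodup_cons.mp hnd).1
        have hz : (t.map (fun k => if k = c then g k else 0)).sum = 0 := by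
          rw [List.sum_eq_zero]
          intro y hy
          obtain ⟨k, hk, rfl⟩ := List.mem_map.mp hy
          have : ¬ (k = c) := fun hh => hx (hh ▸ hk)
          simp [this]
        simp [hz]
      · have hnd' := (List.nodup_cons.mp hnd).2
        have hx : x ∉ t := (List.nodup_cons.mp hnd).1
        have hxc : ¬ (x = c) := fun hh => hx (hh ▸ h)
        simp [hxc, ih hnd' h]

-- Dot product over distinct values = plain sum over all cells.
theorem sum_count_distinct (g : Int → Int) (s : List Int) (hnd : s.Nodup) :
    ∀ fila : List Int, (∀ c ∈ fila, c ∈ s) →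
      (s.map (fun k => (fila.count k : Int) * g k)).sum = (fila.map g).sum := by
  intro fila
  induction fila with
  | nil => intro _; simp
  | cons c t ih =>
      intro hsub
      have hc : c ∈ s := hsub c (List.mem_cons_self ..)
      have ht : ∀ x ∈ t, x ∈ s := fun x hx => hsub x (List.mem_cons_of_mem _ hx)
      have hsplit : (s.map (fun k => ((c :: t).count k : Int) * g k)).sum
          = (s.map (fun k => (t.count k : Int) * g k)).sum
            + (s.map (fun k => if k = c then g k else 0)).sum := by
        rw [← List.sum_map_add]
        apply congrArg
        apply List.map_congr_left
        intro k hk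
        by_cases hkc : k = c
        · subst hkc
          simp only [List.count_cons_self, if_true]
          push_cast
          ring
        · have hck : ¬ (c = k) := fun hh => hkc hh.symm
          simp [hkc, hck]
      rw [hsplit, ih ht, sum_map_ite_single g c s hnd hc, List.map_cons, List.sum_cons]
      ring

-- B's per-row total equals A's per-row total.
theorem rowB_eq_rowA (convs fila : List Int) :
    (((fila.foldl (fun d celda => d.insert celda (d.getD celda 0 + 1))
        (PySem.Dict.empty : PySem.Dict Int Int)).items).map
      (fun p => p.2 * (convs.foldl (fun d v => d.insert v (d.getD v 0 + 1))
        (PySem.Dict.empty : PySem.Dict Int Int)).getD p.1 0)).sum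
    = (fila.map (fun c => (convs.count c : Int))).sum := by
  rw [PySem.Dict.foldl_insert_getD_add_one_eq_counter,
      PySem.Dict.foldl_insert_getD_add_one_eq_counter,
      PySem.Dict.items_counter]
  rw [List.map_map]
  have h1 : ((PySem.Set.ofList fila).map
      ((fun p : Int × Int => p.2 * (PySem.Dict.counter convs).getD p.1 0) ∘
        (fun k => (k, (fila.count k : Int))))).sum
      = ((PySem.Set.ofList fila).map
          (fun k => (fila.count k : Int) * (convs.count k : Int))).sum := by
    apply congrArg
    apply List.map_congr_left
    intro k _
    simp [PySem.Dict.getD_counter]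
  rw [h1]
  exact sum_count_distinct (fun k => (convs.count k : Int)) (PySem.Set.ofList fila)
    (PySem.Set.nodup_ofList fila) fila (fun c hc => (PySem.Set.mem_ofList fila c).mpr hc)

-- first element of the sorted list = min (both as the same match-expression).
theorem head_sorted_eq_min (xs : List Int) (h : xs ≠ []) :
    (match PySem.List.pyGet? (PySem.List.sorted xs (fun x => x) false) 0 with
     | some m => m | none => 0)
    = (match PySem.List.min? xs (fun x => x) with
       | some m => m | none => 0) := by
  have hs : PySem.List.sorted xs (fun x => x) false ≠ [] := by
    intro hh; exact h ((PySem.List.sorted_eq_nil_iff xs (fun x => x) false).mp hh)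
  obtain ⟨m, t, hmt⟩ := List.exists_cons_of_ne_nil hs
  have hmin : ∃ m', PySem.List.min? xs (fun x => x) = some m' := by
    cases hx : PySem.List.min? xs (fun x => x) with
    | none => exact absurd ((PySem.List.min?_eq_none_iff xs (fun x => x)).mp hx) h
    | some m' => exact ⟨m', rfl⟩
  obtain ⟨m', hm'⟩ := hmin
  have hmem : m ∈ xs := (PySem.List.mem_sorted xs (fun x => x) false m).mp
    (hmt ▸ List.mem_cons_self ..)
  have hmem' : m' ∈ xs := PySem.List.min?_mem hm'
  have h1 : m ≤ m' := PySem.List.key_head_sorted_le xs (fun x => x) hmt m' hmem'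
  have h2 : m' ≤ m := PySem.List.min?_isMin hm' m hmem
  rw [hmt, hm', PySem.List.pyGet?_zero_cons]
  exact le_antisymm h1 h2

-- ===== VERDICT (by name: the statement is the Claim_ definition above) =====
theorem cantidad_convinaciones_spec : Claim_equal_cantidad_convinaciones := by
  intro rutas convinaciones _ hpre
  unfold Spec_cantidad_convinaciones cantidad_convinaciones cantidad_convinaciones_alt
  have hmap : rutas.map (fun fila =>
      fila.foldl (fun acc celda =>
        convinaciones.foldl (fun a v => if v == celda then a + 1 else a) acc) (0 : Int))
      = rutas.map (fun fila =>
        (((fila.foldl (fun d celda => d.insert celda (d.getD celda 0 + 1))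
            (PySem.Dict.empty : PySem.Dict Int Int)).items).map
          (fun p => p.2 * (convinaciones.foldl (fun d v => d.insert v (d.getD v 0 + 1))
            (PySem.Dict.empty : PySem.Dict Int Int)).getD p.1 0)).sum) := by
    apply List.map_congr_left
    intro fila _
    rw [rowA_eq_sum, rowB_eq_rowA]
    simp
  simp only [hmap]
  apply head_sorted_eq_min
  intro hh
  exact hpre (List.map_eq_nil_iff.mp hh)
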